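-- pv_equiv track=rewrite | github.com/Amish88r/algos-1 | lab2/lab3.py | strassen_multiply
-- ===== SOURCE A (Python) =====
-- def strassen_multiply(X, Y):
--     """
--     Умножение матриц методом Штрассена.
--     Предполагает, что размеры матриц являются степенью 2.
--     """
--     n = len(X)
--     if n == 1:
--         return [[X[0][0] * Y[0][0]]]
--
--     # Разбиение матриц на подматрицы
--     mid = n // 2
--     A = [row[:mid] for row in X[:mid]]
--     B = [row[mid:] for row in X[:mid]]
--     C = [row[:mid] for row in X[mid:]]
--     D = [row[mid:] for row in X[mid:]]
--     E = [row[:mid] for row in Y[:mid]]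
--     F = [row[mid:] for row in Y[:mid]]
--     G = [row[:mid] for row in Y[mid:]]
--     H = [row[mid:] for row in Y[mid:]]
--
--     # Вычисление семи матриц произведения
--     P1 = strassen_multiply(A, subtract_matrices(F, H))
--     P2 = strassen_multiply(add_matrices(A, B), H)
--     P3 = strassen_multiply(add_matrices(C, D), E)
--     P4 = strassen_multiply(D, subtract_matrices(G, E))
--     P5 = strassen_multiply(add_matrices(A, D), add_matrices(E, H))
--     P6 = strassen_multiply(subtract_matrices(B, D), add_matrices(G, H))
--     P7 = strassen_multiply(subtract_matrices(A, C), add_matrices(E, F))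
--
--     # Вычисление блоков результирующей матрицы
--     R = add_matrices(subtract_matrices(add_matrices(P5, P4), P2), P6)
--     S = add_matrices(P1, P2)
--     T = add_matrices(P3, P4)
--     U = subtract_matrices(subtract_matrices(add_matrices(P5, P1), P3), P7)
--
--     # Сборка результирующей матрицы
--     result = [[0 for _ in range(n)] for _ in range(n)]
--     for i in range(mid):
--         result[i][:mid] = R[i]
--         result[i][mid:] = S[i]
--         result[mid + i][:mid] = T[i]
--         result[mid + i][mid:] = U[i]
--     return result
--
-- def add_matrices(A, B):
--     """
--     Сложение двух матриц.
--     """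
--     n = len(A)
--     result = [[0 for _ in range(n)] for _ in range(n)]
--     for i in range(n):
--         for j in range(n):
--             result[i][j] = A[i][j] + B[i][j]
--     return result
--
-- def subtract_matrices(A, B):
--     """
--     Вычитание двух матриц.
--     """
--     n = len(A)
--     result = [[0 for _ in range(n)] for _ in range(n)]
--     for i in range(n):
--         for j in range(n):
--             result[i][j] = A[i][j] - B[i][j]
--     return result
-- ===== SOURCE B (Python) =====
-- def strassen_multiply(X, Y):
--     """Standard block divide-and-conquer product: 8 recursive sub-products added
--     pairwise, no Strassen P-combinations and no subtraction temporaries."""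
--     n = len(X)
--     if n == 1:
--         return [[X[0][0] * Y[0][0]]]
--     mid = n // 2
--     A = [row[:mid] for row in X[:mid]]
--     B = [row[mid:] for row in X[:mid]]
--     C = [row[:mid] for row in X[mid:]]
--     D = [row[mid:] for row in X[mid:]]
--     E = [row[:mid] for row in Y[:mid]]
--     F = [row[mid:] for row in Y[:mid]]
--     G = [row[:mid] for row in Y[mid:]]
--     H = [row[mid:] for row in Y[mid:]]
--     TL = block_add(strassen_multiply(A, E), strassen_multiply(B, G))
--     TR = block_add(strassen_multiply(A, F), strassen_multiply(B, H))
--     BL = block_add(strassen_multiply(C, E), strassen_multiply(D, G))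
--     BR = block_add(strassen_multiply(C, F), strassen_multiply(D, H))
--     return [TL[i] + TR[i] for i in range(mid)] + [BL[i] + BR[i] for i in range(mid)]
--
-- def block_add(P, Q):
--     m = len(P)
--     return [[P[i][j] + Q[i][j] for j in range(m)] for i in range(m)]
-- ===== Notes on version B (the rewrite author's own statement) =====
-- stated objective: simpler
-- what changed: Replaces Strassen's seven-product scheme (P1..P7 with add/subtract combination temporaries and in-place slice reassembly) with the standard eight-product block recursion: each result quadrant is the plain sum of two recursive sub-products, assembled by row concatenation.
import Mathlib
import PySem

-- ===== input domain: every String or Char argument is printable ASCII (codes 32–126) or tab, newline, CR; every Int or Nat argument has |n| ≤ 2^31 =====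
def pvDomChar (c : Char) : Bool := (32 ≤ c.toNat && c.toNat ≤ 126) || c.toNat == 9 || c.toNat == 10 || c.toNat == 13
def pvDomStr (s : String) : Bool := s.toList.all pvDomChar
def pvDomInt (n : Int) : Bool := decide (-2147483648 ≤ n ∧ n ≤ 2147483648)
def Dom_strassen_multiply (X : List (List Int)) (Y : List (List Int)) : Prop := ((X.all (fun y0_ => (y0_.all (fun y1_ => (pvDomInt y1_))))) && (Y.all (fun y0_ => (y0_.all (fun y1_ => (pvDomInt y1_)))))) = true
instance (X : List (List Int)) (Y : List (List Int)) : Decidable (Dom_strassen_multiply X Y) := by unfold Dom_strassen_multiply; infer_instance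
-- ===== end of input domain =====

-- B replaces Strassen's seven-product scheme (P1..P7 with add/subtract temporaries and
-- slice reassembly) by the standard eight-product block recursion; equal wherever A returns.


-- ===== PORT A =====

-- M[i][j] for Nat indices; Python raises out of range, Pre_ keeps every access in range,
-- so the default 0 / [] is never read on admitted inputs.
def gd (M : List (List Int)) (i j : Nat) : Int := (M.getD i []).getD j 0

-- [[0 for _ in range(n)] for _ in range(n)]
def pyZeros (n : Nat) : List (List Int) := List.replicate n (List.replicate n (0 : Int))

-- add_matrices: zero matrix filled by the nested index loops
def add_matrices (A B : List (List Int)) : List (List Int) :=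
  let n := A.length
  (List.range n).foldl (fun result i =>
    (List.range n).foldl (fun result j =>
      result.set i ((result.getD i []).set j (gd A i j + gd B i j))) result) (pyZeros n)

-- subtract_matrices
def subtract_matrices (A B : List (List Int)) : List (List Int) :=
  let n := A.length
  (List.range n).foldl (fun result i =>
    (List.range n).foldl (fun result j =>
      result.set i ((result.getD i []).set j (gd A i j - gd B i j))) result) (pyZeros n)

-- the four slice assignments of one iteration of A's assembly loop:
-- result[i][:mid] = R[i]; result[i][mid:] = S[i]; result[mid+i][:mid] = T[i]; result[mid+i][mid:] = U[i]
def strassenFill (mid : Nat) (R S T U : List (List Int)) (res : List (List Int)) (i : Nat) :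
    List (List Int) :=
  let r1 := res.set i (R.getD i [] ++ (res.getD i []).drop mid)
  let r2 := r1.set i ((r1.getD i []).take mid ++ S.getD i [])
  let r3 := r2.set (mid + i) (T.getD i [] ++ (r2.getD (mid + i) []).drop mid)
  r3.set (mid + i) ((r3.getD (mid + i) []).take mid ++ U.getD i [])

-- A recurses forever on n = 0 (Python: RecursionError); the fuel only makes the port total
-- there — on every input Pre_ admits the fuel X.length + 1 is never exhausted.
def strassenGo : Nat → List (List Int) → List (List Int) → List (List Int)
  | 0, _, _ => []
  | fuel + 1, X, Y =>
    let n := X.length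
    if n = 1 then [[gd X 0 0 * gd Y 0 0]]
    else
      let mid := n / 2
      let A := (X.take mid).map (fun row => row.take mid)
      let B := (X.take mid).map (fun row => row.drop mid)
      let C := (X.drop mid).map (fun row => row.take mid)
      let D := (X.drop mid).map (fun row => row.drop mid)
      let E := (Y.take mid).map (fun row => row.take mid)
      let F := (Y.take mid).map (fun row => row.drop mid)
      let G := (Y.drop mid).map (fun row => row.take mid)
      let H := (Y.drop mid).map (fun row => row.drop mid)
      let P1 := strassenGo fuel A (subtract_matrices F H)
      let P2 := strassenGo fuel (add_matrices A B) H
      let P3 := strassenGo fuel (add_matrices C D) E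
      let P4 := strassenGo fuel D (subtract_matrices G E)
      let P5 := strassenGo fuel (add_matrices A D) (add_matrices E H)
      let P6 := strassenGo fuel (subtract_matrices B D) (add_matrices G H)
      let P7 := strassenGo fuel (subtract_matrices A C) (add_matrices E F)
      let R := add_matrices (subtract_matrices (add_matrices P5 P4) P2) P6
      let S := add_matrices P1 P2
      let T := add_matrices P3 P4
      let U := subtract_matrices (subtract_matrices (add_matrices P5 P1) P3) P7
      (List.range mid).foldl (strassenFill mid R S T U) (pyZeros n)

def strassen_multiply (X : List (List Int)) (Y : List (List Int)) : List (List Int) :=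
  strassenGo (X.length + 1) X Y

-- ===== PORT B =====

-- [[P[i][j] + Q[i][j] for j in range(m)] for i in range(m)], m = len(P)
def block_add (P Q : List (List Int)) : List (List Int) :=
  let m := P.length
  (List.range m).map (fun i => (List.range m).map (fun j => gd P i j + gd Q i j))

-- B recurses forever on n = 0 exactly like A; the fuel only makes the port total there.
def altGo : Nat → List (List Int) → List (List Int) → List (List Int)
  | 0, _, _ => []
  | fuel + 1, X, Y =>
    let n := X.length
    if n = 1 then [[gd X 0 0 * gd Y 0 0]]
    else
      let mid := n / 2
      let A := (X.take mid).map (fun row => row.take mid)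
      let B := (X.take mid).map (fun row => row.drop mid)
      let C := (X.drop mid).map (fun row => row.take mid)
      let D := (X.drop mid).map (fun row => row.drop mid)
      let E := (Y.take mid).map (fun row => row.take mid)
      let F := (Y.take mid).map (fun row => row.drop mid)
      let G := (Y.drop mid).map (fun row => row.take mid)
      let H := (Y.drop mid).map (fun row => row.drop mid)
      let TL := block_add (altGo fuel A E) (altGo fuel B G)
      let TR := block_add (altGo fuel A F) (altGo fuel B H)
      let BL := block_add (altGo fuel C E) (altGo fuel D G)
      let BR := block_add (altGo fuel C F) (altGo fuel D H)
      (List.range mid).map (fun i => TL.getD i [] ++ TR.getD i [])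
        ++ (List.range mid).map (fun i => BL.getD i [] ++ BR.getD i [])

def strassen_multiply_alt (X : List (List Int)) (Y : List (List Int)) : List (List Int) :=
  altGo (X.length + 1) X Y

-- ===== PRECONDITION & SPEC =====

def isPow2 (n : Nat) : Bool := decide (∃ k < n + 1, n = 2 ^ k)

-- Pre_ is exactly the set of inputs on which the Python A returns (elsewhere it raises
-- IndexError, or RecursionError on an empty X): for a 1×1 X it only needs X[0][0] and
-- Y[0][0] to exist; otherwise X must be a power-of-2 square (rows at least that long),
-- and Y must have exactly that many rows, each at least that long.
def Pre_strassen_multiply (X : List (List Int)) (Y : List (List Int)) : Prop :=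
  if X.length = 1 then X.getD 0 [] ≠ [] ∧ Y ≠ [] ∧ Y.getD 0 [] ≠ []
  else isPow2 X.length = true ∧ Y.length = X.length ∧
    (∀ r ∈ X, X.length ≤ r.length) ∧ (∀ r ∈ Y, X.length ≤ r.length)

instance (X : List (List Int)) (Y : List (List Int)) : Decidable (Pre_strassen_multiply X Y) := by
  unfold Pre_strassen_multiply; infer_instance

def pvWitness_strassen_multiply : List (List Int) × List (List Int) :=
  ([[1, 2], [3, 4]], [[5, 6], [7, 8]])

def Spec_strassen_multiply (X : List (List Int)) (Y : List (List Int)) (out : List (List Int)) : Prop := out = strassen_multiply_alt X Y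
instance (X : List (List Int)) (Y : List (List Int)) (out : List (List Int)) : Decidable (Spec_strassen_multiply X Y out) := by unfold Spec_strassen_multiply; infer_instance

-- ===== CLAIM (what is proved, stated in full; the proofs are below) =====
def Claim_equal_strassen_multiply : Prop := ∀ (X : List (List Int)) (Y : List (List Int)), Dom_strassen_multiply X Y → Pre_strassen_multiply X Y → Spec_strassen_multiply X Y (strassen_multiply X Y)


-- ===== LEMMAS AND PROOFS =====

-- proof-only notions: the n×n matrix of entries f i j, the exact block product entry, shapes
def mkL (n : Nat) (f : Nat → Nat → Int) : List (List Int) :=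
  (List.range n).map (fun i => (List.range n).map (f i))

def dotF (m : Nat) (X Y : List (List Int)) (i j : Nat) : Int :=
  ∑ k ∈ Finset.range m, gd X i k * gd Y k j

def Ok (m : Nat) (M : List (List Int)) : Prop :=
  M.length = m ∧ ∀ r ∈ M, m ≤ r.length

-- helper names for the let-bound matrices of one unfolding of A's recursion (proof-only)
def bTT (mid : Nat) (M : List (List Int)) : List (List Int) := (M.take mid).map (fun row => row.take mid)
def bTD (mid : Nat) (M : List (List Int)) : List (List Int) := (M.take mid).map (fun row => row.drop mid)
def bDT (mid : Nat) (M : List (List Int)) : List (List Int) := (M.drop mid).map (fun row => row.take mid)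
def bDD (mid : Nat) (M : List (List Int)) : List (List Int) := (M.drop mid).map (fun row => row.drop mid)
def pP1 (fuel mid : Nat) (X Y : List (List Int)) : List (List Int) := strassenGo fuel (bTT mid X) (subtract_matrices (bTD mid Y) (bDD mid Y))
def pP2 (fuel mid : Nat) (X Y : List (List Int)) : List (List Int) := strassenGo fuel (add_matrices (bTT mid X) (bTD mid X)) (bDD mid Y)
def pP3 (fuel mid : Nat) (X Y : List (List Int)) : List (List Int) := strassenGo fuel (add_matrices (bDT mid X) (bDD mid X)) (bTT mid Y)
def pP4 (fuel mid : Nat) (X Y : List (List Int)) : List (List Int) := strassenGo fuel (bDD mid X) (subtract_matrices (bDT mid Y) (bTT mid Y))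
def pP5 (fuel mid : Nat) (X Y : List (List Int)) : List (List Int) := strassenGo fuel (add_matrices (bTT mid X) (bDD mid X)) (add_matrices (bTT mid Y) (bDD mid Y))
def pP6 (fuel mid : Nat) (X Y : List (List Int)) : List (List Int) := strassenGo fuel (subtract_matrices (bTD mid X) (bDD mid X)) (add_matrices (bDT mid Y) (bDD mid Y))
def pP7 (fuel mid : Nat) (X Y : List (List Int)) : List (List Int) := strassenGo fuel (subtract_matrices (bTT mid X) (bDT mid X)) (add_matrices (bTT mid Y) (bTD mid Y))
def pR (fuel mid : Nat) (X Y : List (List Int)) : List (List Int) := add_matrices (subtract_matrices (add_matrices (pP5 fuel mid X Y) (pP4 fuel mid X Y)) (pP2 fuel mid X Y)) (pP6 fuel mid X Y)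
def pS (fuel mid : Nat) (X Y : List (List Int)) : List (List Int) := add_matrices (pP1 fuel mid X Y) (pP2 fuel mid X Y)
def pT (fuel mid : Nat) (X Y : List (List Int)) : List (List Int) := add_matrices (pP3 fuel mid X Y) (pP4 fuel mid X Y)
def pU (fuel mid : Nat) (X Y : List (List Int)) : List (List Int) := subtract_matrices (subtract_matrices (add_matrices (pP5 fuel mid X Y) (pP1 fuel mid X Y)) (pP3 fuel mid X Y)) (pP7 fuel mid X Y)

theorem go_succ (fuel : Nat) (X Y : List (List Int)) (h1 : X.length ≠ 1) :
    strassenGo (fuel + 1) X Y =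
      (List.range (X.length / 2)).foldl
        (strassenFill (X.length / 2) (pR fuel (X.length / 2) X Y) (pS fuel (X.length / 2) X Y)
          (pT fuel (X.length / 2) X Y) (pU fuel (X.length / 2) X Y)) (pyZeros X.length) := by
  simp only [strassenGo, if_neg h1, pR, pS, pT, pU, pP1, pP2, pP3, pP4, pP5, pP6, pP7,
    bTT, bTD, bDT, bDD]

theorem foldl_len_inv {α β : Type} (f : List α → β → List α)
    (h : ∀ a b, (f a b).length = a.length) :
    ∀ (l : List β) (res : List α), (l.foldl f res).length = res.length := by
  intro l
  induction l with
  | nil => intro res; rfl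
  | cons b l ih => intro res; simp only [List.foldl_cons]; rw [ih, h]

theorem foldl_congr_P {α β : Type} (P : α → Prop) (f g : α → β → α)
    (hf : ∀ a b, P a → P (f a b)) (hfg : ∀ a b, P a → f a b = g a b) :
    ∀ (l : List β) (a : α), P a → l.foldl f a = l.foldl g a := by
  intro l
  induction l with
  | nil => intros; rfl
  | cons b l ih =>
    intro a ha
    simp only [List.foldl_cons]
    rw [← hfg a b ha]
    exact ih (f a b) (hf a b ha)

theorem getD_set_self {α : Type} (l : List α) (i : Nat) (a d : α) (h : i < l.length) :
    (l.set i a).getD i d = a := by simp [List.getD, h]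

theorem getD_set_ne {α : Type} (l : List α) (i j : Nat) (a d : α) (h : j ≠ i) :
    (l.set i a).getD j d = l.getD j d := by
  simp [List.getD, Ne.symm h]

theorem set_getD_self {α : Type} (l : List α) (i : Nat) (d : α) (h : i < l.length) :
    l.set i (l.getD i d) = l := by
  rw [List.getD_eq_getElem l d h]
  exact List.set_getElem_self h

theorem getD_replicate' {α : Type} (n j : Nat) (a d : α) (h : j < n) :
    (List.replicate n a).getD j d = a := by simp [List.getD, h]

theorem list_ext_getD {α : Type} (d : α) (a b : List α) (hlen : a.length = b.length)
    (h : ∀ j, j < a.length → a.getD j d = b.getD j d) : a = b := by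
  apply List.ext_getElem hlen
  intro j h1 h2
  have := h j h1
  rwa [List.getD_eq_getElem a d h1, List.getD_eq_getElem b d h2] at this

theorem rowfold_set (v : Nat → Int) :
    ∀ (l : List Nat) (res : List (List Int)) (i : Nat), i < res.length →
      l.foldl (fun r j => r.set i ((r.getD i []).set j (v j))) res
        = res.set i (l.foldl (fun row j => row.set j (v j)) (res.getD i [])) := by
  intro l
  induction l with
  | nil => intro res i h; rw [List.foldl_nil, List.foldl_nil, set_getD_self res i [] h]
  | cons j l ih =>
    intro res i h
    simp only [List.foldl_cons]
    rw [ih (res.set i ((res.getD i []).set j (v j))) i (by simpa using h),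
        getD_set_self res i _ [] h, List.set_set]

theorem rowfold_oob (v : Nat → Int) :
    ∀ (l : List Nat) (res : List (List Int)) (i : Nat), res.length ≤ i →
      l.foldl (fun r j => r.set i ((r.getD i []).set j (v j))) res = res := by
  intro l
  induction l with
  | nil => intros; rfl
  | cons j l ih =>
    intro res i h
    simp only [List.foldl_cons]
    rw [List.set_eq_of_length_le h, ih res i h]

theorem setfold_getD_g {α : Type} (g : Nat → α → α) (d : α) :
    ∀ (l : List Nat), l.Nodup → ∀ (res : List α) (j : Nat),
      (l.foldl (fun r i => r.set i (g i (r.getD i d))) res).getD j d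
        = if j ∈ l ∧ j < res.length then g j (res.getD j d) else res.getD j d := by
  intro l
  induction l with
  | nil => intro _ res j; simp
  | cons i l ih =>
    intro hnd res j
    have hi : i ∉ l := (List.nodup_cons.mp hnd).1
    have hl : l.Nodup := (List.nodup_cons.mp hnd).2
    simp only [List.foldl_cons]
    rw [ih hl, List.length_set]
    by_cases hji : j = i
    · subst hji
      by_cases hlen : j < res.length
      · rw [getD_set_self res j _ d hlen]
        simp [hi, hlen]
      · rw [List.set_eq_of_length_le (Nat.le_of_not_lt hlen)]
        simp [hlen]
    · rw [getD_set_ne res i j _ d hji]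
      simp [List.mem_cons, hji]

theorem mk_row (n : Nat) (f : Nat → Nat → Int) (i : Nat) (hi : i < n) :
    (mkL n f).getD i [] = (List.range n).map (f i) :=
  PySem.List.getD_map_range _ n i [] hi

theorem mk_length' (n : Nat) (f : Nat → Nat → Int) : (mkL n f).length = n := by
  simp [mkL]

theorem gd_mk (n : Nat) (f : Nat → Nat → Int) (i j : Nat) (hi : i < n) (hj : j < n) :
    gd (mkL n f) i j = f i j := by
  rw [gd, mk_row n f i hi, PySem.List.getD_map_range _ n j 0 hj]

theorem ok_mk (n : Nat) (f : Nat → Nat → Int) : Ok n (mkL n f) := by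
  constructor
  · exact mk_length' n f
  · intro r hr
    simp only [mkL, List.mem_map] at hr
    obtain ⟨i, _, rfl⟩ := hr
    simp

theorem add_eq_mk (A B : List (List Int)) :
    add_matrices A B = mkL A.length (fun i j => gd A i j + gd B i j) := by
  have hz : (pyZeros A.length).length = A.length := by simp [pyZeros]
  rw [add_matrices]
  have hcongr := foldl_congr_P (fun (r : List (List Int)) => r.length = A.length)
    (fun result i => (List.range A.length).foldl
      (fun result j => result.set i ((result.getD i []).set j (gd A i j + gd B i j))) result)
    (fun result i => result.set i ((List.range A.length).foldl
      (fun row j => row.set j (gd A i j + gd B i j)) (result.getD i [])))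
    (by
      intro r i hr
      beta_reduce
      rw [foldl_len_inv _ (by intro a b; exact List.length_set ..) _ r]
      exact hr)
    (by
      intro r i hr
      beta_reduce
      by_cases hlt : i < r.length
      · exact rowfold_set _ _ r i hlt
      · rw [rowfold_oob _ _ r i (Nat.le_of_not_lt hlt),
          List.set_eq_of_length_le (Nat.le_of_not_lt hlt)])
    (List.range A.length) (pyZeros A.length) hz
  rw [hcongr]
  apply list_ext_getD []
  · rw [foldl_len_inv _ (by intro a b; exact List.length_set ..), hz, mk_length']
  · intro j hj
    rw [foldl_len_inv _ (by intro a b; exact List.length_set ..), hz] at hj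
    have hmain := setfold_getD_g
      (fun i row => (List.range A.length).foldl
        (fun row j => row.set j (gd A i j + gd B i j)) row) ([] : List Int)
      (List.range A.length) List.nodup_range (pyZeros A.length) j
    beta_reduce at hmain
    rw [hmain, mk_row _ _ j hj]
    simp only [List.mem_range, hj, hz, and_self, if_pos]
    rw [pyZeros, getD_replicate' _ j _ [] hj]
    apply list_ext_getD 0
    · rw [foldl_len_inv _ (by intro a b; exact List.length_set ..)]
      simp
    · intro j2 hj2
      rw [foldl_len_inv _ (by intro a b; exact List.length_set ..)] at hj2
      simp only [List.length_replicate] at hj2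
      have hin := setfold_getD_g (fun j2 _ => gd A j j2 + gd B j j2) 0
        (List.range A.length) List.nodup_range (List.replicate A.length 0) j2
      beta_reduce at hin
      rw [hin]
      simp only [List.mem_range, hj2, List.length_replicate, and_self, if_pos]
      rw [PySem.List.getD_map_range _ _ j2 0 hj2]

theorem sub_eq_mk (A B : List (List Int)) :
    subtract_matrices A B = mkL A.length (fun i j => gd A i j - gd B i j) := by
  have hz : (pyZeros A.length).length = A.length := by simp [pyZeros]
  rw [subtract_matrices]
  have hcongr := foldl_congr_P (fun (r : List (List Int)) => r.length = A.length)
    (fun result i => (List.range A.length).foldl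
      (fun result j => result.set i ((result.getD i []).set j (gd A i j - gd B i j))) result)
    (fun result i => result.set i ((List.range A.length).foldl
      (fun row j => row.set j (gd A i j - gd B i j)) (result.getD i [])))
    (by
      intro r i hr
      beta_reduce
      rw [foldl_len_inv _ (by intro a b; exact List.length_set ..) _ r]
      exact hr)
    (by
      intro r i hr
      beta_reduce
      by_cases hlt : i < r.length
      · exact rowfold_set _ _ r i hlt
      · rw [rowfold_oob _ _ r i (Nat.le_of_not_lt hlt),
          List.set_eq_of_length_le (Nat.le_of_not_lt hlt)])
    (List.range A.length) (pyZeros A.length) hz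
  rw [hcongr]
  apply list_ext_getD []
  · rw [foldl_len_inv _ (by intro a b; exact List.length_set ..), hz, mk_length']
  · intro j hj
    rw [foldl_len_inv _ (by intro a b; exact List.length_set ..), hz] at hj
    have hmain := setfold_getD_g
      (fun i row => (List.range A.length).foldl
        (fun row j => row.set j (gd A i j - gd B i j)) row) ([] : List Int)
      (List.range A.length) List.nodup_range (pyZeros A.length) j
    beta_reduce at hmain
    rw [hmain, mk_row _ _ j hj]
    simp only [List.mem_range, hj, hz, and_self, if_pos]
    rw [pyZeros, getD_replicate' _ j _ [] hj]
    apply list_ext_getD 0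
    · rw [foldl_len_inv _ (by intro a b; exact List.length_set ..)]
      simp
    · intro j2 hj2
      rw [foldl_len_inv _ (by intro a b; exact List.length_set ..)] at hj2
      simp only [List.length_replicate] at hj2
      have hin := setfold_getD_g (fun j2 _ => gd A j j2 - gd B j j2) 0
        (List.range A.length) List.nodup_range (List.replicate A.length 0) j2
      beta_reduce at hin
      rw [hin]
      simp only [List.mem_range, hj2, List.length_replicate, and_self, if_pos]
      rw [PySem.List.getD_map_range _ _ j2 0 hj2]

theorem gd_add (A B : List (List Int)) (i j : Nat) (hi : i < A.length) (hj : j < A.length) :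
    gd (add_matrices A B) i j = gd A i j + gd B i j := by
  rw [add_eq_mk, gd_mk _ _ i j hi hj]

theorem gd_sub (A B : List (List Int)) (i j : Nat) (hi : i < A.length) (hj : j < A.length) :
    gd (subtract_matrices A B) i j = gd A i j - gd B i j := by
  rw [sub_eq_mk, gd_mk _ _ i j hi hj]

theorem ok_add (A B : List (List Int)) (m : Nat) (h : A.length = m) : Ok m (add_matrices A B) := by
  rw [add_eq_mk, h]; exact ok_mk m _

theorem ok_sub (A B : List (List Int)) (m : Nat) (h : A.length = m) :
    Ok m (subtract_matrices A B) := by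
  rw [sub_eq_mk, h]; exact ok_mk m _

theorem len_tt (mid : Nat) (M : List (List Int)) (h : mid + mid ≤ M.length) :
    (bTT mid M).length = mid := by simp [bTT]; omega

theorem len_td (mid : Nat) (M : List (List Int)) (h : mid + mid ≤ M.length) :
    (bTD mid M).length = mid := by simp [bTD]; omega

theorem len_dt (mid : Nat) (M : List (List Int)) (h : M.length = mid + mid) :
    (bDT mid M).length = mid := by simp [bDT, h]

theorem len_dd (mid : Nat) (M : List (List Int)) (h : M.length = mid + mid) :
    (bDD mid M).length = mid := by simp [bDD, h]

theorem ok_tt (mid : Nat) (M : List (List Int)) (h : Ok (mid + mid) M) : Ok mid (bTT mid M) := by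
  refine ⟨len_tt mid M (le_of_eq h.1.symm), ?_⟩
  intro r hr
  simp only [bTT, List.mem_map] at hr
  obtain ⟨s, hs, rfl⟩ := hr
  have := h.2 s (List.mem_of_mem_take hs)
  simp; omega

theorem ok_td (mid : Nat) (M : List (List Int)) (h : Ok (mid + mid) M) : Ok mid (bTD mid M) := by
  refine ⟨len_td mid M (le_of_eq h.1.symm), ?_⟩
  intro r hr
  simp only [bTD, List.mem_map] at hr
  obtain ⟨s, hs, rfl⟩ := hr
  have := h.2 s (List.mem_of_mem_take hs)
  simp; omega

theorem ok_dt (mid : Nat) (M : List (List Int)) (h : Ok (mid + mid) M) : Ok mid (bDT mid M) := by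
  refine ⟨len_dt mid M h.1, ?_⟩
  intro r hr
  simp only [bDT, List.mem_map] at hr
  obtain ⟨s, hs, rfl⟩ := hr
  have := h.2 s (List.mem_of_mem_drop hs)
  simp; omega

theorem ok_dd (mid : Nat) (M : List (List Int)) (h : Ok (mid + mid) M) : Ok mid (bDD mid M) := by
  refine ⟨len_dd mid M h.1, ?_⟩
  intro r hr
  simp only [bDD, List.mem_map] at hr
  obtain ⟨s, hs, rfl⟩ := hr
  have := h.2 s (List.mem_of_mem_drop hs)
  simp; omega

theorem gd_tt (mid : Nat) (M : List (List Int)) (i j : Nat) (hiM : i < M.length)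
    (hi : i < mid) (hj : j < mid) : gd (bTT mid M) i j = gd M i j := by
  simp [bTT, gd, List.getD, List.getElem?_take, hi, hj, hiM, List.getElem?_map]

theorem gd_td (mid : Nat) (M : List (List Int)) (i j : Nat) (hiM : i < M.length)
    (hi : i < mid) : gd (bTD mid M) i j = gd M i (mid + j) := by
  simp [bTD, gd, List.getD, List.getElem?_take, hi, hiM, List.getElem?_map, List.getElem?_drop]

theorem gd_dt (mid : Nat) (M : List (List Int)) (i j : Nat) (hiM : mid + i < M.length)
    (hj : j < mid) : gd (bDT mid M) i j = gd M (mid + i) j := by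
  simp [bDT, gd, List.getD, List.getElem?_take, hj, hiM, List.getElem?_map, List.getElem?_drop]

theorem gd_dd (mid : Nat) (M : List (List Int)) (i j : Nat) (hiM : mid + i < M.length) :
    gd (bDD mid M) i j = gd M (mid + i) (mid + j) := by
  simp [bDD, gd, List.getD, hiM, List.getElem?_map, List.getElem?_drop]

theorem fill_length (mid : Nat) (R S T U res : List (List Int)) (i : Nat) :
    (strassenFill mid R S T U res i).length = res.length := by
  simp [strassenFill]

theorem fill_getD (mid : Nat) (R S T U res : List (List Int)) (i : Nat)
    (hmid : 0 < mid) (hi : i < mid) (hlen : mid + mid ≤ res.length) (j : Nat) :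
    (strassenFill mid R S T U res i).getD j []
      = if j = i then (R.getD i [] ++ (res.getD i []).drop mid).take mid ++ S.getD i []
        else if j = mid + i then
          (T.getD i [] ++ (res.getD (mid + i) []).drop mid).take mid ++ U.getD i []
        else res.getD j [] := by
  have hlt : i < res.length := by omega
  have hlt2 : mid + i < res.length := by omega
  have hne : (mid + i : Nat) ≠ i := by omega
  have hne' : (i : Nat) ≠ mid + i := by omega
  have hm0 : mid ≠ 0 := by omega
  simp only [strassenFill]
  by_cases h1 : j = i
  · subst h1
    simp [getD_set_self, getD_set_ne, List.getElem_set_self, List.getElem_set_ne,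
      List.getElem?_set_ne, hlt, hlt2, hne, Ne.symm hne, hne', hm0]
  · by_cases h2 : j = mid + i
    · subst h2
      simp [getD_set_self, getD_set_ne, List.getElem_set_self, List.getElem_set_ne,
        List.getElem?_set_ne, hlt, hlt2, hne, Ne.symm hne, hne', hm0, h1]
    · rw [getD_set_ne _ (mid + i) j _ [] h2, getD_set_ne _ (mid + i) j _ [] h2,
        getD_set_ne _ i j _ [] h1, getD_set_ne res i j _ [] h1, if_neg h1, if_neg h2]

theorem fillfold_getD (mid : Nat) (R S T U : List (List Int)) (hmid : 0 < mid) :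
    ∀ (l : List Nat), l.Nodup → (∀ i ∈ l, i < mid) →
      ∀ (res : List (List Int)), mid + mid ≤ res.length → ∀ (j : Nat),
      (l.foldl (strassenFill mid R S T U) res).getD j []
        = if j ∈ l then (R.getD j [] ++ (res.getD j []).drop mid).take mid ++ S.getD j []
          else if mid ≤ j ∧ j - mid ∈ l then
            (T.getD (j - mid) [] ++ (res.getD j []).drop mid).take mid ++ U.getD (j - mid) []
          else res.getD j [] := by
  intro l
  induction l with
  | nil => intro _ _ res _ j; simp
  | cons i l ih =>
    intro hnd hbound res hres j
    have hi : i ∉ l := (List.nodup_cons.mp hnd).1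
    have hl : l.Nodup := (List.nodup_cons.mp hnd).2
    have hib : i < mid := hbound i (List.mem_cons_self ..)
    have hbound' : ∀ i' ∈ l, i' < mid := fun i' h' => hbound i' (List.mem_cons_of_mem _ h')
    have hmil : mid + i ∉ l := fun h => by have := hbound' _ h; omega
    simp only [List.foldl_cons]
    rw [ih hl hbound' (strassenFill mid R S T U res i)
      (by rw [fill_length]; exact hres)]
    rw [fill_getD mid R S T U res i hmid hib hres j]
    by_cases hjl : j ∈ l
    · have hjm : j < mid := hbound' j hjl
      have hji : j ≠ i := fun h => hi (h ▸ hjl)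
      have hj2 : j ≠ mid + i := by omega
      rw [if_neg hji, if_neg hj2, if_pos hjl, if_pos (List.mem_cons_of_mem i hjl)]
    · by_cases hji : j = i
      · subst hji
        rw [if_pos rfl, if_neg hjl,
          if_neg (fun h => absurd h.1 (by omega : ¬ mid ≤ j)),
          if_pos (List.mem_cons_self ..)]
      · by_cases hj2 : j = mid + i
        · subst hj2
          have hni : (mid + i : Nat) ≠ i := by omega
          rw [if_neg hni, if_pos rfl, if_neg hmil,
            if_neg (fun h => hi (by simpa using h.2)),
            if_neg (fun h => (List.mem_cons.mp h).elim (fun h' => absurd h' hni) hmil),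
            if_pos ⟨Nat.le_add_right mid i, by simpa using List.mem_cons_self ..⟩]
          simp
        · have hnc : j ∉ (i :: l) :=
            fun h => (List.mem_cons.mp h).elim (fun h' => hji h') hjl
          by_cases hup : mid ≤ j ∧ j - mid ∈ l
          · rw [if_neg hji, if_neg hj2, if_neg hjl, if_pos hup, if_neg hnc,
              if_pos ⟨hup.1, List.mem_cons_of_mem i hup.2⟩]
          · rw [if_neg hji, if_neg hj2, if_neg hjl, if_neg hup, if_neg hnc,
              if_neg (fun h => (List.mem_cons.mp h.2).elim
                (fun h' => hj2 (by omega)) (fun h' => hup ⟨h.1, h'⟩))]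

theorem isPow2_pow : ∀ n : Nat, isPow2 n = true → ∃ k, n = 2 ^ k := by
  intro n h
  obtain ⟨k, _, hk⟩ := of_decide_eq_true h
  exact ⟨k, hk⟩

theorem comb4 (m : Nat) (p q r s t : Nat → Int)
    (h : ∀ x ∈ Finset.range m, ((p x + q x) - r x) + s x = t x) :
    ((((∑ x ∈ Finset.range m, p x) + ∑ x ∈ Finset.range m, q x) - ∑ x ∈ Finset.range m, r x)
        + ∑ x ∈ Finset.range m, s x) = ∑ x ∈ Finset.range m, t x := by
  rw [← Finset.sum_add_distrib, ← Finset.sum_sub_distrib, ← Finset.sum_add_distrib]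
  exact Finset.sum_congr rfl h

theorem comb4m (m : Nat) (p q r s t : Nat → Int)
    (h : ∀ x ∈ Finset.range m, ((p x + q x) - r x) - s x = t x) :
    ((((∑ x ∈ Finset.range m, p x) + ∑ x ∈ Finset.range m, q x) - ∑ x ∈ Finset.range m, r x)
        - ∑ x ∈ Finset.range m, s x) = ∑ x ∈ Finset.range m, t x := by
  rw [← Finset.sum_add_distrib, ← Finset.sum_sub_distrib, ← Finset.sum_sub_distrib]
  exact Finset.sum_congr rfl h

theorem comb2 (m : Nat) (p q t : Nat → Int)
    (h : ∀ x ∈ Finset.range m, p x + q x = t x) :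
    (∑ x ∈ Finset.range m, p x) + (∑ x ∈ Finset.range m, q x) = ∑ x ∈ Finset.range m, t x := by
  rw [← Finset.sum_add_distrib]
  exact Finset.sum_congr rfl h

theorem goA_eq (k : Nat) : ∀ (fuel : Nat) (X Y : List (List Int)), k < fuel →
    Ok (2 ^ k) X → Ok (2 ^ k) Y →
    strassenGo fuel X Y = mkL (2 ^ k) (dotF (2 ^ k) X Y) := by
  induction k with
  | zero =>
    intro fuel X Y hf hX hY
    obtain ⟨f, rfl⟩ : ∃ f, fuel = f + 1 := ⟨fuel - 1, by omega⟩
    have hx1 : X.length = 1 := by simpa using hX.1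
    simp [strassenGo, hx1, mkL, dotF, List.range_one, Finset.sum_range_one]
  | succ k ih =>
    intro fuel X Y hf hX hY
    obtain ⟨f, rfl⟩ : ∃ f, fuel = f + 1 := ⟨fuel - 1, by omega⟩
    set mid := 2 ^ k with hmid_def
    have hmid : 0 < mid := Nat.two_pow_pos k
    have hsum : 2 ^ (k + 1) = mid + mid := by rw [pow_succ, hmid_def]; ring
    have hXlen : X.length = mid + mid := by rw [← hsum]; exact hX.1
    have hYlen : Y.length = mid + mid := by rw [← hsum]; exact hY.1
    have h1 : X.length ≠ 1 := by omega
    have hdiv : X.length / 2 = mid := by omega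
    have hkf : k < f := by omega
    have hOkX : Ok (mid + mid) X := by rw [← hsum]; exact hX
    have hOkY : Ok (mid + mid) Y := by rw [← hsum]; exact hY
    have lA : (bTT mid X).length = mid := len_tt mid X (by omega)
    have lB : (bTD mid X).length = mid := len_td mid X (by omega)
    have lC : (bDT mid X).length = mid := len_dt mid X hXlen
    have lD : (bDD mid X).length = mid := len_dd mid X hXlen
    have lE : (bTT mid Y).length = mid := len_tt mid Y (by omega)
    have lF : (bTD mid Y).length = mid := len_td mid Y (by omega)
    have lG : (bDT mid Y).length = mid := len_dt mid Y hYlen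
    have lH : (bDD mid Y).length = mid := len_dd mid Y hYlen
    have hP1 : pP1 f mid X Y = mkL mid (dotF mid (bTT mid X)
        (subtract_matrices (bTD mid Y) (bDD mid Y))) :=
      ih f _ _ hkf (ok_tt mid X hOkX) (ok_sub _ _ mid lF)
    have hP2 : pP2 f mid X Y = mkL mid (dotF mid
        (add_matrices (bTT mid X) (bTD mid X)) (bDD mid Y)) :=
      ih f _ _ hkf (ok_add _ _ mid lA) (ok_dd mid Y hOkY)
    have hP3 : pP3 f mid X Y = mkL mid (dotF mid
        (add_matrices (bDT mid X) (bDD mid X)) (bTT mid Y)) :=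
      ih f _ _ hkf (ok_add _ _ mid lC) (ok_tt mid Y hOkY)
    have hP4 : pP4 f mid X Y = mkL mid (dotF mid (bDD mid X)
        (subtract_matrices (bDT mid Y) (bTT mid Y))) :=
      ih f _ _ hkf (ok_dd mid X hOkX) (ok_sub _ _ mid lG)
    have hP5 : pP5 f mid X Y = mkL mid (dotF mid
        (add_matrices (bTT mid X) (bDD mid X)) (add_matrices (bTT mid Y) (bDD mid Y))) :=
      ih f _ _ hkf (ok_add _ _ mid lA) (ok_add _ _ mid lE)
    have hP6 : pP6 f mid X Y = mkL mid (dotF mid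
        (subtract_matrices (bTD mid X) (bDD mid X)) (add_matrices (bDT mid Y) (bDD mid Y))) :=
      ih f _ _ hkf (ok_sub _ _ mid lB) (ok_add _ _ mid lG)
    have hP7 : pP7 f mid X Y = mkL mid (dotF mid
        (subtract_matrices (bTT mid X) (bDT mid X)) (add_matrices (bTT mid Y) (bTD mid Y))) :=
      ih f _ _ hkf (ok_sub _ _ mid lA) (ok_add _ _ mid lE)
    have lP1 : (pP1 f mid X Y).length = mid := by rw [hP1, mk_length']
    have lP2 : (pP2 f mid X Y).length = mid := by rw [hP2, mk_length']
    have lP3 : (pP3 f mid X Y).length = mid := by rw [hP3, mk_length']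
    have lP5 : (pP5 f mid X Y).length = mid := by rw [hP5, mk_length']
    have l54 : (add_matrices (pP5 f mid X Y) (pP4 f mid X Y)).length = mid := by
      rw [add_eq_mk, mk_length', lP5]
    have l542 : (subtract_matrices (add_matrices (pP5 f mid X Y) (pP4 f mid X Y))
        (pP2 f mid X Y)).length = mid := by rw [sub_eq_mk, mk_length', l54]
    have l51 : (add_matrices (pP5 f mid X Y) (pP1 f mid X Y)).length = mid := by
      rw [add_eq_mk, mk_length', lP5]
    have l513 : (subtract_matrices (add_matrices (pP5 f mid X Y) (pP1 f mid X Y))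
        (pP3 f mid X Y)).length = mid := by rw [sub_eq_mk, mk_length', l51]
    -- entry values of the four assembled blocks
    have eR : ∀ i j, i < mid → j < mid → gd (pR f mid X Y) i j =
        ((dotF mid (add_matrices (bTT mid X) (bDD mid X))
            (add_matrices (bTT mid Y) (bDD mid Y)) i j
          + dotF mid (bDD mid X) (subtract_matrices (bDT mid Y) (bTT mid Y)) i j)
          - dotF mid (add_matrices (bTT mid X) (bTD mid X)) (bDD mid Y) i j)
          + dotF mid (subtract_matrices (bTD mid X) (bDD mid X))
              (add_matrices (bDT mid Y) (bDD mid Y)) i j := by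
      intro i j hi hj
      show gd (add_matrices (subtract_matrices (add_matrices (pP5 f mid X Y) (pP4 f mid X Y))
        (pP2 f mid X Y)) (pP6 f mid X Y)) i j = _
      rw [gd_add _ _ i j (by rw [l542]; exact hi) (by rw [l542]; exact hj),
        gd_sub _ _ i j (by rw [l54]; exact hi) (by rw [l54]; exact hj),
        gd_add _ _ i j (by rw [lP5]; exact hi) (by rw [lP5]; exact hj),
        hP5, gd_mk _ _ i j hi hj, hP4, gd_mk _ _ i j hi hj,
        hP2, gd_mk _ _ i j hi hj, hP6, gd_mk _ _ i j hi hj]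
    have eS : ∀ i j, i < mid → j < mid → gd (pS f mid X Y) i j =
        dotF mid (bTT mid X) (subtract_matrices (bTD mid Y) (bDD mid Y)) i j
          + dotF mid (add_matrices (bTT mid X) (bTD mid X)) (bDD mid Y) i j := by
      intro i j hi hj
      show gd (add_matrices (pP1 f mid X Y) (pP2 f mid X Y)) i j = _
      rw [gd_add _ _ i j (by rw [lP1]; exact hi) (by rw [lP1]; exact hj),
        hP1, gd_mk _ _ i j hi hj, hP2, gd_mk _ _ i j hi hj]
    have eT : ∀ i j, i < mid → j < mid → gd (pT f mid X Y) i j =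
        dotF mid (add_matrices (bDT mid X) (bDD mid X)) (bTT mid Y) i j
          + dotF mid (bDD mid X) (subtract_matrices (bDT mid Y) (bTT mid Y)) i j := by
      intro i j hi hj
      show gd (add_matrices (pP3 f mid X Y) (pP4 f mid X Y)) i j = _
      rw [gd_add _ _ i j (by rw [lP3]; exact hi) (by rw [lP3]; exact hj),
        hP3, gd_mk _ _ i j hi hj, hP4, gd_mk _ _ i j hi hj]
    have eU : ∀ i j, i < mid → j < mid → gd (pU f mid X Y) i j =
        ((dotF mid (add_matrices (bTT mid X) (bDD mid X))
            (add_matrices (bTT mid Y) (bDD mid Y)) i j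
          + dotF mid (bTT mid X) (subtract_matrices (bTD mid Y) (bDD mid Y)) i j)
          - dotF mid (add_matrices (bDT mid X) (bDD mid X)) (bTT mid Y) i j)
          - dotF mid (subtract_matrices (bTT mid X) (bDT mid X))
              (add_matrices (bTT mid Y) (bTD mid Y)) i j := by
      intro i j hi hj
      show gd (subtract_matrices (subtract_matrices (add_matrices (pP5 f mid X Y)
        (pP1 f mid X Y)) (pP3 f mid X Y)) (pP7 f mid X Y)) i j = _
      rw [gd_sub _ _ i j (by rw [l513]; exact hi) (by rw [l513]; exact hj),
        gd_sub _ _ i j (by rw [l51]; exact hi) (by rw [l51]; exact hj),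
        gd_add _ _ i j (by rw [lP5]; exact hi) (by rw [lP5]; exact hj),
        hP5, gd_mk _ _ i j hi hj, hP1, gd_mk _ _ i j hi hj,
        hP3, gd_mk _ _ i j hi hj, hP7, gd_mk _ _ i j hi hj]
    -- the four Strassen identities, entrywise
    have TL : ∀ i j, i < mid → j < mid → gd (pR f mid X Y) i j =
        dotF (mid + mid) X Y i j := by
      intro i j hi hj
      have hiX : i < X.length := by
        rw [hXlen]; exact Nat.lt_of_lt_of_le hi (Nat.le_add_right mid mid)
      have hmiX : mid + i < X.length := by rw [hXlen]; exact Nat.add_lt_add_left hi mid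
      rw [eR i j hi hj]
      have step : (((dotF mid (add_matrices (bTT mid X) (bDD mid X))
            (add_matrices (bTT mid Y) (bDD mid Y)) i j
          + dotF mid (bDD mid X) (subtract_matrices (bDT mid Y) (bTT mid Y)) i j)
          - dotF mid (add_matrices (bTT mid X) (bTD mid X)) (bDD mid Y) i j)
          + dotF mid (subtract_matrices (bTD mid X) (bDD mid X))
              (add_matrices (bDT mid Y) (bDD mid Y)) i j)
          = ∑ x ∈ Finset.range mid,
              (gd X i x * gd Y x j + gd X i (mid + x) * gd Y (mid + x) j) := by
        simp only [dotF]
        apply comb4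
        intro x hx
        have hx' := Finset.mem_range.mp hx
        have hxY : x < Y.length := by
          rw [hYlen]; exact Nat.lt_of_lt_of_le hx' (Nat.le_add_right mid mid)
        have hmxY : mid + x < Y.length := by rw [hYlen]; exact Nat.add_lt_add_left hx' mid
        rw [gd_add _ _ i x (by rw [lA]; exact hi) (by rw [lA]; exact hx'),
          gd_add _ _ x j (by rw [lE]; exact hx') (by rw [lE]; exact hj),
          gd_sub _ _ x j (by rw [lG]; exact hx') (by rw [lG]; exact hj),
          gd_add _ _ i x (by rw [lA]; exact hi) (by rw [lA]; exact hx'),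
          gd_sub _ _ i x (by rw [lB]; exact hi) (by rw [lB]; exact hx'),
          gd_add _ _ x j (by rw [lG]; exact hx') (by rw [lG]; exact hj),
          gd_tt mid X i x hiX hi hx', gd_dd mid X i x hmiX,
          gd_tt mid Y x j hxY hx' hj, gd_dd mid Y x j hmxY,
          gd_dt mid Y x j hmxY hj, gd_td mid X i x hiX hi]
        ring
      rw [step]
      simp only [dotF]
      rw [Finset.sum_range_add]
      exact Finset.sum_add_distrib
    have TR : ∀ i j, i < mid → j < mid → gd (pS f mid X Y) i j =
        dotF (mid + mid) X Y i (mid + j) := by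
      intro i j hi hj
      have hiX : i < X.length := by
        rw [hXlen]; exact Nat.lt_of_lt_of_le hi (Nat.le_add_right mid mid)
      rw [eS i j hi hj]
      have step : (dotF mid (bTT mid X) (subtract_matrices (bTD mid Y) (bDD mid Y)) i j
          + dotF mid (add_matrices (bTT mid X) (bTD mid X)) (bDD mid Y) i j)
          = ∑ x ∈ Finset.range mid,
              (gd X i x * gd Y x (mid + j) + gd X i (mid + x) * gd Y (mid + x) (mid + j)) := by
        simp only [dotF]
        apply comb2
        intro x hx
        have hx' := Finset.mem_range.mp hx
        have hxY : x < Y.length := by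
          rw [hYlen]; exact Nat.lt_of_lt_of_le hx' (Nat.le_add_right mid mid)
        have hmxY : mid + x < Y.length := by rw [hYlen]; exact Nat.add_lt_add_left hx' mid
        rw [gd_sub _ _ x j (by rw [lF]; exact hx') (by rw [lF]; exact hj),
          gd_add _ _ i x (by rw [lA]; exact hi) (by rw [lA]; exact hx'),
          gd_tt mid X i x hiX hi hx', gd_td mid X i x hiX hi,
          gd_td mid Y x j hxY hx', gd_dd mid Y x j hmxY]
        ring
      rw [step]
      simp only [dotF]
      rw [Finset.sum_range_add]
      exact Finset.sum_add_distrib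
    have BL : ∀ i j, i < mid → j < mid → gd (pT f mid X Y) i j =
        dotF (mid + mid) X Y (mid + i) j := by
      intro i j hi hj
      have hmiX : mid + i < X.length := by rw [hXlen]; exact Nat.add_lt_add_left hi mid
      rw [eT i j hi hj]
      have step : (dotF mid (add_matrices (bDT mid X) (bDD mid X)) (bTT mid Y) i j
          + dotF mid (bDD mid X) (subtract_matrices (bDT mid Y) (bTT mid Y)) i j)
          = ∑ x ∈ Finset.range mid,
              (gd X (mid + i) x * gd Y x j + gd X (mid + i) (mid + x) * gd Y (mid + x) j) := by
        simp only [dotF]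
        apply comb2
        intro x hx
        have hx' := Finset.mem_range.mp hx
        have hxY : x < Y.length := by
          rw [hYlen]; exact Nat.lt_of_lt_of_le hx' (Nat.le_add_right mid mid)
        have hmxY : mid + x < Y.length := by rw [hYlen]; exact Nat.add_lt_add_left hx' mid
        rw [gd_add _ _ i x (by rw [lC]; exact hi) (by rw [lC]; exact hx'),
          gd_sub _ _ x j (by rw [lG]; exact hx') (by rw [lG]; exact hj),
          gd_dt mid X i x hmiX hx', gd_dd mid X i x hmiX,
          gd_tt mid Y x j hxY hx' hj, gd_dt mid Y x j hmxY hj]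
        ring
      rw [step]
      simp only [dotF]
      rw [Finset.sum_range_add]
      exact Finset.sum_add_distrib
    have BR : ∀ i j, i < mid → j < mid → gd (pU f mid X Y) i j =
        dotF (mid + mid) X Y (mid + i) (mid + j) := by
      intro i j hi hj
      have hiX : i < X.length := by
        rw [hXlen]; exact Nat.lt_of_lt_of_le hi (Nat.le_add_right mid mid)
      have hmiX : mid + i < X.length := by rw [hXlen]; exact Nat.add_lt_add_left hi mid
      rw [eU i j hi hj]
      have step : (((dotF mid (add_matrices (bTT mid X) (bDD mid X))
            (add_matrices (bTT mid Y) (bDD mid Y)) i j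
          + dotF mid (bTT mid X) (subtract_matrices (bTD mid Y) (bDD mid Y)) i j)
          - dotF mid (add_matrices (bDT mid X) (bDD mid X)) (bTT mid Y) i j)
          - dotF mid (subtract_matrices (bTT mid X) (bDT mid X))
              (add_matrices (bTT mid Y) (bTD mid Y)) i j)
          = ∑ x ∈ Finset.range mid,
              (gd X (mid + i) x * gd Y x (mid + j)
                + gd X (mid + i) (mid + x) * gd Y (mid + x) (mid + j)) := by
        simp only [dotF]
        apply comb4m
        intro x hx
        have hx' := Finset.mem_range.mp hx
        have hxY : x < Y.length := by
          rw [hYlen]; exact Nat.lt_of_lt_of_le hx' (Nat.le_add_right mid mid)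
        have hmxY : mid + x < Y.length := by rw [hYlen]; exact Nat.add_lt_add_left hx' mid
        rw [gd_add _ _ i x (by rw [lA]; exact hi) (by rw [lA]; exact hx'),
          gd_add _ _ x j (by rw [lE]; exact hx') (by rw [lE]; exact hj),
          gd_sub _ _ x j (by rw [lF]; exact hx') (by rw [lF]; exact hj),
          gd_add _ _ i x (by rw [lC]; exact hi) (by rw [lC]; exact hx'),
          gd_sub _ _ i x (by rw [lA]; exact hi) (by rw [lA]; exact hx'),
          gd_add _ _ x j (by rw [lE]; exact hx') (by rw [lE]; exact hj),
          gd_tt mid X i x hiX hi hx', gd_dd mid X i x hmiX,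
          gd_tt mid Y x j hxY hx' hj, gd_dd mid Y x j hmxY,
          gd_td mid Y x j hxY hx', gd_dt mid X i x hmiX hx']
        ring
      rw [step]
      simp only [dotF]
      rw [Finset.sum_range_add]
      exact Finset.sum_add_distrib
    -- rows of the four blocks
    have lR : (pR f mid X Y).length = mid := by rw [pR, add_eq_mk, mk_length', l542]
    have lS : (pS f mid X Y).length = mid := by rw [pS, add_eq_mk, mk_length', lP1]
    have lT : (pT f mid X Y).length = mid := by rw [pT, add_eq_mk, mk_length', lP3]
    have lU : (pU f mid X Y).length = mid := by rw [pU, sub_eq_mk, mk_length', l513]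
    -- assembled result
    rw [go_succ f X Y h1, hdiv, hsum, hXlen]
    apply list_ext_getD []
    · rw [foldl_len_inv _ (fill_length mid (pR f mid X Y) (pS f mid X Y) (pT f mid X Y)
        (pU f mid X Y)), mk_length']
      simp [pyZeros]
    · intro j0 hj0
      rw [foldl_len_inv _ (fill_length mid (pR f mid X Y) (pS f mid X Y) (pT f mid X Y)
        (pU f mid X Y))] at hj0
      simp only [pyZeros, List.length_replicate] at hj0
      rw [fillfold_getD mid _ _ _ _ hmid (List.range mid) List.nodup_range
        (fun i hi => List.mem_range.mp hi) (pyZeros (mid + mid)) (by simp [pyZeros]) j0,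
        mk_row _ _ j0 hj0]
      rw [show (pyZeros (mid + mid)).getD j0 [] = List.replicate (mid + mid) (0 : Int) from by
        rw [pyZeros]; exact getD_replicate' _ j0 _ [] hj0]
      rw [List.range_add, List.map_append, List.map_map]
      by_cases hlt : j0 < mid
      · rw [if_pos (List.mem_range.mpr hlt)]
        have hRmk : pR f mid X Y = mkL mid (fun i j =>
            gd (subtract_matrices (add_matrices (pP5 f mid X Y) (pP4 f mid X Y))
              (pP2 f mid X Y)) i j + gd (pP6 f mid X Y) i j) := by
          show add_matrices (subtract_matrices (add_matrices (pP5 f mid X Y)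
            (pP4 f mid X Y)) (pP2 f mid X Y)) (pP6 f mid X Y) = _
          rw [add_eq_mk, l542]
        have hSmk : pS f mid X Y = mkL mid (fun i j =>
            gd (pP1 f mid X Y) i j + gd (pP2 f mid X Y) i j) := by
          show add_matrices (pP1 f mid X Y) (pP2 f mid X Y) = _
          rw [add_eq_mk, lP1]
        have hRrow : (pR f mid X Y).getD j0 [] =
            (List.range mid).map (fun j => gd (pR f mid X Y) j0 j) := by
          rw [hRmk, mk_row _ _ j0 hlt]
          apply List.map_congr_left
          intro t ht
          rw [gd_mk _ _ j0 t hlt (List.mem_range.mp ht)]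
        have hSrow : (pS f mid X Y).getD j0 [] =
            (List.range mid).map (fun j => gd (pS f mid X Y) j0 j) := by
          rw [hSmk, mk_row _ _ j0 hlt]
          apply List.map_congr_left
          intro t ht
          rw [gd_mk _ _ j0 t hlt (List.mem_range.mp ht)]
        rw [hRrow, hSrow,
          List.take_left' (by simp : ((List.range mid).map
            (fun j => gd (pR f mid X Y) j0 j)).length = mid)]
        congr 1
        · apply List.map_congr_left
          intro t ht
          exact TL j0 t hlt (List.mem_range.mp ht)
        · apply List.map_congr_left
          intro t ht
          simp only [Function.comp]
          exact TR j0 t hlt (List.mem_range.mp ht)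
      · have hle : mid ≤ j0 := Nat.le_of_not_lt hlt
        have hi0 : j0 - mid < mid := by
          rw [Nat.sub_lt_iff_lt_add hle]; exact hj0
        have hj0eq : mid + (j0 - mid) = j0 := Nat.add_sub_cancel' hle
        rw [if_neg (by simpa using hlt), if_pos ⟨hle, List.mem_range.mpr hi0⟩]
        have hTmk : pT f mid X Y = mkL mid (fun i j =>
            gd (pP3 f mid X Y) i j + gd (pP4 f mid X Y) i j) := by
          show add_matrices (pP3 f mid X Y) (pP4 f mid X Y) = _
          rw [add_eq_mk, lP3]
        have hUmk : pU f mid X Y = mkL mid (fun i j =>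
            gd (subtract_matrices (add_matrices (pP5 f mid X Y) (pP1 f mid X Y))
              (pP3 f mid X Y)) i j - gd (pP7 f mid X Y) i j) := by
          show subtract_matrices (subtract_matrices (add_matrices (pP5 f mid X Y)
            (pP1 f mid X Y)) (pP3 f mid X Y)) (pP7 f mid X Y) = _
          rw [sub_eq_mk, l513]
        have hTrow : (pT f mid X Y).getD (j0 - mid) [] =
            (List.range mid).map (fun j => gd (pT f mid X Y) (j0 - mid) j) := by
          rw [hTmk, mk_row _ _ _ hi0]
          apply List.map_congr_left
          intro t ht
          rw [gd_mk _ _ (j0 - mid) t hi0 (List.mem_range.mp ht)]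
        have hUrow : (pU f mid X Y).getD (j0 - mid) [] =
            (List.range mid).map (fun j => gd (pU f mid X Y) (j0 - mid) j) := by
          rw [hUmk, mk_row _ _ _ hi0]
          apply List.map_congr_left
          intro t ht
          rw [gd_mk _ _ (j0 - mid) t hi0 (List.mem_range.mp ht)]
        rw [hTrow, hUrow,
          List.take_left' (by simp : ((List.range mid).map
            (fun j => gd (pT f mid X Y) (j0 - mid) j)).length = mid)]
        congr 1
        · apply List.map_congr_left
          intro t ht
          rw [BL (j0 - mid) t hi0 (List.mem_range.mp ht), hj0eq]
        · apply List.map_congr_left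
          intro t ht
          simp only [Function.comp]
          rw [BR (j0 - mid) t hi0 (List.mem_range.mp ht), hj0eq]

def qTL (fuel mid : Nat) (X Y : List (List Int)) : List (List Int) :=
  block_add (altGo fuel (bTT mid X) (bTT mid Y)) (altGo fuel (bTD mid X) (bDT mid Y))
def qTR (fuel mid : Nat) (X Y : List (List Int)) : List (List Int) :=
  block_add (altGo fuel (bTT mid X) (bTD mid Y)) (altGo fuel (bTD mid X) (bDD mid Y))
def qBL (fuel mid : Nat) (X Y : List (List Int)) : List (List Int) :=
  block_add (altGo fuel (bDT mid X) (bTT mid Y)) (altGo fuel (bDD mid X) (bDT mid Y))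
def qBR (fuel mid : Nat) (X Y : List (List Int)) : List (List Int) :=
  block_add (altGo fuel (bDT mid X) (bTD mid Y)) (altGo fuel (bDD mid X) (bDD mid Y))

theorem altgo_succ (fuel : Nat) (X Y : List (List Int)) (h1 : X.length ≠ 1) :
    altGo (fuel + 1) X Y =
      (List.range (X.length / 2)).map (fun i =>
          (qTL fuel (X.length / 2) X Y).getD i [] ++ (qTR fuel (X.length / 2) X Y).getD i [])
        ++ (List.range (X.length / 2)).map (fun i =>
          (qBL fuel (X.length / 2) X Y).getD i [] ++ (qBR fuel (X.length / 2) X Y).getD i []) := by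
  simp only [altGo, if_neg h1, qTL, qTR, qBL, qBR, bTT, bTD, bDT, bDD]

theorem block_add_mk (P Q : List (List Int)) :
    block_add P Q = mkL P.length (fun i j => gd P i j + gd Q i j) := rfl

set_option maxHeartbeats 2000000 in
theorem goB_eq (k : Nat) : ∀ (fuel : Nat) (X Y : List (List Int)), k < fuel →
    Ok (2 ^ k) X → Ok (2 ^ k) Y →
    altGo fuel X Y = mkL (2 ^ k) (dotF (2 ^ k) X Y) := by
  induction k with
  | zero =>
    intro fuel X Y hf hX hY
    obtain ⟨f, rfl⟩ : ∃ f, fuel = f + 1 := ⟨fuel - 1, by omega⟩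
    have hx1 : X.length = 1 := by simpa using hX.1
    simp [altGo, hx1, mkL, dotF, List.range_one]
  | succ k ih =>
    intro fuel X Y hf hX hY
    obtain ⟨f, rfl⟩ : ∃ f, fuel = f + 1 := ⟨fuel - 1, by omega⟩
    set mid := 2 ^ k with hmid_def
    have hmid : 0 < mid := Nat.two_pow_pos k
    have hsum : 2 ^ (k + 1) = mid + mid := by rw [pow_succ, hmid_def]; ring
    have hXlen : X.length = mid + mid := by rw [← hsum]; exact hX.1
    have hYlen : Y.length = mid + mid := by rw [← hsum]; exact hY.1
    have h1 : X.length ≠ 1 := by omega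
    have hdiv : X.length / 2 = mid := by omega
    have hkf : k < f := by omega
    have hOkX : Ok (mid + mid) X := by rw [← hsum]; exact hX
    have hOkY : Ok (mid + mid) Y := by rw [← hsum]; exact hY
    have lA : (bTT mid X).length = mid := len_tt mid X (by omega)
    have hAE : altGo f (bTT mid X) (bTT mid Y) =
        mkL mid (dotF mid (bTT mid X) (bTT mid Y)) :=
      ih f _ _ hkf (ok_tt mid X hOkX) (ok_tt mid Y hOkY)
    have hBG : altGo f (bTD mid X) (bDT mid Y) =
        mkL mid (dotF mid (bTD mid X) (bDT mid Y)) :=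
      ih f _ _ hkf (ok_td mid X hOkX) (ok_dt mid Y hOkY)
    have hAF : altGo f (bTT mid X) (bTD mid Y) =
        mkL mid (dotF mid (bTT mid X) (bTD mid Y)) :=
      ih f _ _ hkf (ok_tt mid X hOkX) (ok_td mid Y hOkY)
    have hBH : altGo f (bTD mid X) (bDD mid Y) =
        mkL mid (dotF mid (bTD mid X) (bDD mid Y)) :=
      ih f _ _ hkf (ok_td mid X hOkX) (ok_dd mid Y hOkY)
    have hCE : altGo f (bDT mid X) (bTT mid Y) =
        mkL mid (dotF mid (bDT mid X) (bTT mid Y)) :=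
      ih f _ _ hkf (ok_dt mid X hOkX) (ok_tt mid Y hOkY)
    have hDG : altGo f (bDD mid X) (bDT mid Y) =
        mkL mid (dotF mid (bDD mid X) (bDT mid Y)) :=
      ih f _ _ hkf (ok_dd mid X hOkX) (ok_dt mid Y hOkY)
    have hCF : altGo f (bDT mid X) (bTD mid Y) =
        mkL mid (dotF mid (bDT mid X) (bTD mid Y)) :=
      ih f _ _ hkf (ok_dt mid X hOkX) (ok_td mid Y hOkY)
    have hDH : altGo f (bDD mid X) (bDD mid Y) =
        mkL mid (dotF mid (bDD mid X) (bDD mid Y)) :=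
      ih f _ _ hkf (ok_dd mid X hOkX) (ok_dd mid Y hOkY)
    have lAE : (altGo f (bTT mid X) (bTT mid Y)).length = mid := by rw [hAE, mk_length']
    have lAF : (altGo f (bTT mid X) (bTD mid Y)).length = mid := by rw [hAF, mk_length']
    have lCE : (altGo f (bDT mid X) (bTT mid Y)).length = mid := by rw [hCE, mk_length']
    have lCF : (altGo f (bDT mid X) (bTD mid Y)).length = mid := by rw [hCF, mk_length']
    have hTLmk : qTL f mid X Y = mkL mid (fun i j =>
        gd (altGo f (bTT mid X) (bTT mid Y)) i j
          + gd (altGo f (bTD mid X) (bDT mid Y)) i j) := by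
      show block_add (altGo f (bTT mid X) (bTT mid Y)) (altGo f (bTD mid X) (bDT mid Y)) = _
      rw [block_add_mk, lAE]
    have hTRmk : qTR f mid X Y = mkL mid (fun i j =>
        gd (altGo f (bTT mid X) (bTD mid Y)) i j
          + gd (altGo f (bTD mid X) (bDD mid Y)) i j) := by
      show block_add (altGo f (bTT mid X) (bTD mid Y)) (altGo f (bTD mid X) (bDD mid Y)) = _
      rw [block_add_mk, lAF]
    have hBLmk : qBL f mid X Y = mkL mid (fun i j =>
        gd (altGo f (bDT mid X) (bTT mid Y)) i j
          + gd (altGo f (bDD mid X) (bDT mid Y)) i j) := by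
      show block_add (altGo f (bDT mid X) (bTT mid Y)) (altGo f (bDD mid X) (bDT mid Y)) = _
      rw [block_add_mk, lCE]
    have hBRmk : qBR f mid X Y = mkL mid (fun i j =>
        gd (altGo f (bDT mid X) (bTD mid Y)) i j
          + gd (altGo f (bDD mid X) (bDD mid Y)) i j) := by
      show block_add (altGo f (bDT mid X) (bTD mid Y)) (altGo f (bDD mid X) (bDD mid Y)) = _
      rw [block_add_mk, lCF]
    -- entrywise identities for the four quadrants
    have TLid : ∀ i j, i < mid → j < mid → gd (qTL f mid X Y) i j =
        dotF (mid + mid) X Y i j := by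
      intro i j hi hj
      have hiX : i < X.length := by
        rw [hXlen]; exact Nat.lt_of_lt_of_le hi (Nat.le_add_right mid mid)
      rw [hTLmk, gd_mk _ _ i j hi hj, hAE, gd_mk _ _ i j hi hj, hBG, gd_mk _ _ i j hi hj]
      have step : dotF mid (bTT mid X) (bTT mid Y) i j
          + dotF mid (bTD mid X) (bDT mid Y) i j
          = ∑ x ∈ Finset.range mid,
              (gd X i x * gd Y x j + gd X i (mid + x) * gd Y (mid + x) j) := by
        simp only [dotF]
        apply comb2
        intro x hx
        have hx' := Finset.mem_range.mp hx
        have hxY : x < Y.length := by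
          rw [hYlen]; exact Nat.lt_of_lt_of_le hx' (Nat.le_add_right mid mid)
        have hmxY : mid + x < Y.length := by rw [hYlen]; exact Nat.add_lt_add_left hx' mid
        rw [gd_tt mid X i x hiX hi hx', gd_tt mid Y x j hxY hx' hj,
          gd_td mid X i x hiX hi, gd_dt mid Y x j hmxY hj]
      rw [step]
      simp only [dotF]
      rw [Finset.sum_range_add]
      exact Finset.sum_add_distrib
    have TRid : ∀ i j, i < mid → j < mid → gd (qTR f mid X Y) i j =
        dotF (mid + mid) X Y i (mid + j) := by
      intro i j hi hj
      have hiX : i < X.length := by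
        rw [hXlen]; exact Nat.lt_of_lt_of_le hi (Nat.le_add_right mid mid)
      rw [hTRmk, gd_mk _ _ i j hi hj, hAF, gd_mk _ _ i j hi hj, hBH, gd_mk _ _ i j hi hj]
      have step : dotF mid (bTT mid X) (bTD mid Y) i j
          + dotF mid (bTD mid X) (bDD mid Y) i j
          = ∑ x ∈ Finset.range mid,
              (gd X i x * gd Y x (mid + j) + gd X i (mid + x) * gd Y (mid + x) (mid + j)) := by
        simp only [dotF]
        apply comb2
        intro x hx
        have hx' := Finset.mem_range.mp hx
        have hxY : x < Y.length := by
          rw [hYlen]; exact Nat.lt_of_lt_of_le hx' (Nat.le_add_right mid mid)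
        have hmxY : mid + x < Y.length := by rw [hYlen]; exact Nat.add_lt_add_left hx' mid
        rw [gd_tt mid X i x hiX hi hx', gd_td mid Y x j hxY hx',
          gd_td mid X i x hiX hi, gd_dd mid Y x j hmxY]
      rw [step]
      simp only [dotF]
      rw [Finset.sum_range_add]
      exact Finset.sum_add_distrib
    have BLid : ∀ i j, i < mid → j < mid → gd (qBL f mid X Y) i j =
        dotF (mid + mid) X Y (mid + i) j := by
      intro i j hi hj
      have hmiX : mid + i < X.length := by rw [hXlen]; exact Nat.add_lt_add_left hi mid
      rw [hBLmk, gd_mk _ _ i j hi hj, hCE, gd_mk _ _ i j hi hj, hDG, gd_mk _ _ i j hi hj]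
      have step : dotF mid (bDT mid X) (bTT mid Y) i j
          + dotF mid (bDD mid X) (bDT mid Y) i j
          = ∑ x ∈ Finset.range mid,
              (gd X (mid + i) x * gd Y x j + gd X (mid + i) (mid + x) * gd Y (mid + x) j) := by
        simp only [dotF]
        apply comb2
        intro x hx
        have hx' := Finset.mem_range.mp hx
        have hxY : x < Y.length := by
          rw [hYlen]; exact Nat.lt_of_lt_of_le hx' (Nat.le_add_right mid mid)
        have hmxY : mid + x < Y.length := by rw [hYlen]; exact Nat.add_lt_add_left hx' mid
        rw [gd_dt mid X i x hmiX hx', gd_tt mid Y x j hxY hx' hj,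
          gd_dd mid X i x hmiX, gd_dt mid Y x j hmxY hj]
      rw [step]
      simp only [dotF]
      rw [Finset.sum_range_add]
      exact Finset.sum_add_distrib
    have BRid : ∀ i j, i < mid → j < mid → gd (qBR f mid X Y) i j =
        dotF (mid + mid) X Y (mid + i) (mid + j) := by
      intro i j hi hj
      have hmiX : mid + i < X.length := by rw [hXlen]; exact Nat.add_lt_add_left hi mid
      rw [hBRmk, gd_mk _ _ i j hi hj, hCF, gd_mk _ _ i j hi hj, hDH, gd_mk _ _ i j hi hj]
      have step : dotF mid (bDT mid X) (bTD mid Y) i j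
          + dotF mid (bDD mid X) (bDD mid Y) i j
          = ∑ x ∈ Finset.range mid,
              (gd X (mid + i) x * gd Y x (mid + j)
                + gd X (mid + i) (mid + x) * gd Y (mid + x) (mid + j)) := by
        simp only [dotF]
        apply comb2
        intro x hx
        have hx' := Finset.mem_range.mp hx
        have hxY : x < Y.length := by
          rw [hYlen]; exact Nat.lt_of_lt_of_le hx' (Nat.le_add_right mid mid)
        have hmxY : mid + x < Y.length := by rw [hYlen]; exact Nat.add_lt_add_left hx' mid
        rw [gd_dt mid X i x hmiX hx', gd_td mid Y x j hxY hx',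
          gd_dd mid X i x hmiX, gd_dd mid Y x j hmxY]
      rw [step]
      simp only [dotF]
      rw [Finset.sum_range_add]
      exact Finset.sum_add_distrib
    rw [altgo_succ f X Y h1, hdiv, hsum]
    apply list_ext_getD []
    · simp [mk_length']
    · intro j0 hj0
      simp only [List.length_append, List.length_map, List.length_range] at hj0
      rw [mk_row _ _ j0 hj0, List.range_add, List.map_append, List.map_map]
      by_cases hlt : j0 < mid
      · rw [List.getD_append _ _ [] j0 (by simpa using hlt)]
        rw [PySem.List.getD_map_range _ mid j0 [] hlt]
        have hTLrow : (qTL f mid X Y).getD j0 [] =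
            (List.range mid).map (fun j => gd (qTL f mid X Y) j0 j) := by
          rw [hTLmk, mk_row _ _ j0 hlt]
          apply List.map_congr_left
          intro t ht
          rw [gd_mk _ _ j0 t hlt (List.mem_range.mp ht)]
        have hTRrow : (qTR f mid X Y).getD j0 [] =
            (List.range mid).map (fun j => gd (qTR f mid X Y) j0 j) := by
          rw [hTRmk, mk_row _ _ j0 hlt]
          apply List.map_congr_left
          intro t ht
          rw [gd_mk _ _ j0 t hlt (List.mem_range.mp ht)]
        rw [hTLrow, hTRrow]
        congr 1
        · apply List.map_congr_left
          intro t ht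
          exact TLid j0 t hlt (List.mem_range.mp ht)
        · apply List.map_congr_left
          intro t ht
          simp only [Function.comp]
          exact TRid j0 t hlt (List.mem_range.mp ht)
      · have hle : mid ≤ j0 := Nat.le_of_not_lt hlt
        have hi0 : j0 - mid < mid := by
          rw [Nat.sub_lt_iff_lt_add hle]; exact hj0
        have hj0eq : mid + (j0 - mid) = j0 := Nat.add_sub_cancel' hle
        rw [List.getD_append_right _ _ [] j0 (by simpa using hle)]
        simp only [List.length_map, List.length_range]
        rw [PySem.List.getD_map_range _ mid (j0 - mid) [] hi0]
        have hBLrow : (qBL f mid X Y).getD (j0 - mid) [] =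
            (List.range mid).map (fun j => gd (qBL f mid X Y) (j0 - mid) j) := by
          rw [hBLmk, mk_row _ _ _ hi0]
          apply List.map_congr_left
          intro t ht
          rw [gd_mk _ _ (j0 - mid) t hi0 (List.mem_range.mp ht)]
        have hBRrow : (qBR f mid X Y).getD (j0 - mid) [] =
            (List.range mid).map (fun j => gd (qBR f mid X Y) (j0 - mid) j) := by
          rw [hBRmk, mk_row _ _ _ hi0]
          apply List.map_congr_left
          intro t ht
          rw [gd_mk _ _ (j0 - mid) t hi0 (List.mem_range.mp ht)]
        rw [hBLrow, hBRrow]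
        congr 1
        · apply List.map_congr_left
          intro t ht
          rw [BLid (j0 - mid) t hi0 (List.mem_range.mp ht), hj0eq]
        · apply List.map_congr_left
          intro t ht
          simp only [Function.comp]
          rw [BRid (j0 - mid) t hi0 (List.mem_range.mp ht), hj0eq]

-- ===== VERDICT (by name: the statement is the Claim_ definition above) =====
theorem strassen_multiply_spec : Claim_equal_strassen_multiply := by
  intro X Y _ hpre
  unfold Spec_strassen_multiply
  by_cases h1 : X.length = 1
  · rw [strassen_multiply, strassen_multiply_alt, h1]
    simp [strassenGo, altGo, h1]
  · rw [Pre_strassen_multiply, if_neg h1] at hpre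
    obtain ⟨hpow, hY, hXr, hYr⟩ := hpre
    obtain ⟨k, hk⟩ := isPow2_pow X.length hpow
    have hfa : k < X.length + 1 := by
      rw [hk]; have := Nat.lt_two_pow_self (n := k); omega
    have hOkX : Ok (2 ^ k) X := ⟨hk, by intro r hr; rw [← hk]; exact hXr r hr⟩
    have hOkY : Ok (2 ^ k) Y := ⟨by omega, by intro r hr; rw [← hk]; exact hYr r hr⟩
    rw [strassen_multiply, goA_eq k (X.length + 1) X Y hfa hOkX hOkY,
      strassen_multiply_alt, goB_eq k (X.length + 1) X Y hfa hOkX hOkY]
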